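-- pv_equiv track=rewrite | github.com/xforce-io/milkie | milkie/agent/llm_block.py | _processMarkdownList
-- ===== SOURCE A (Python) =====
-- def _processMarkdownList(instructions: list[tuple[str, str]]) -> list[tuple[str, str]]:
--     processedInstructions = []
--     lastNonDashLabel = None
--     lastNonDashInstruction = None
--     instructionsToRemove = {}
--     for label, instruction in instructions:
--         if label == "-":
--             if lastNonDashInstruction:
--                 instruction = f"{lastNonDashInstruction}. {instruction}"
--                 instructionsToRemove[(lastNonDashLabel, lastNonDashInstruction)] = True
--         else:
--             lastNonDashLabel = label
--             lastNonDashInstruction = instruction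
--         processedInstructions.append((label, instruction))
--
--     for label, instruction in instructionsToRemove:
--         instructions.remove((label, instruction))
--     return processedInstructions
-- ===== SOURCE B (Python) =====
-- def _processMarkdownList(instructions: list[tuple[str, str]]) -> list[tuple[str, str]]:
--     # Segment into runs: a leading run of parent-less dash items, then
--     # (parent, children) runs.  Equivalence is about the return value; B also
--     # reproduces A's in-place removal of prefixing parents from `instructions`.
--     def span_dash(items):
--         k = 0
--         while k < len(items) and items[k][0] == "-":
--             k += 1
--         return items[:k], items[k:]
--
--     lead, rest = span_dash(list(instructions))
--     out = list(lead)
--     removed = []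
--     while rest:
--         parent = rest[0]
--         kids, rest = span_dash(rest[1:])
--         out.append(parent)
--         pi = parent[1]
--         for cl, ci in kids:
--             out.append((cl, f"{pi}. {ci}" if pi else ci))
--         if kids and pi and parent not in removed:
--             removed.append(parent)
--     for p in removed:
--         instructions.remove(p)
--     return out
-- ===== Notes on version B (the rewrite author's own statement) =====
-- stated objective: alternative
-- what changed: B replaces A's single stateful pass (carrying last-non-dash label/instruction and a dedup dict) by segmenting the list into (parent, dash-children) runs with a span helper, emitting each run at once and collecting prefixing parents in a list for the same in-place removal.
import Mathlib
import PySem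

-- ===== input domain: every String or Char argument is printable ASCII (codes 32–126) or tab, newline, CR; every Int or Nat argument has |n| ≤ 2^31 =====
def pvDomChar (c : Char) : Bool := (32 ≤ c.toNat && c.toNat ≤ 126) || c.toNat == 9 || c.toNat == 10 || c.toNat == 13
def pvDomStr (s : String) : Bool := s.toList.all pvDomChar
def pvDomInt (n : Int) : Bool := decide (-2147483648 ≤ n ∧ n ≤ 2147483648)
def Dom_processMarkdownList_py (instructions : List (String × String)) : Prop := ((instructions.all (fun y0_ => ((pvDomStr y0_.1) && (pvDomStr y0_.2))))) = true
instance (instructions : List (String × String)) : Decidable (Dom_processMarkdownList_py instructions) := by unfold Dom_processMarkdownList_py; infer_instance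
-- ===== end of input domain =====

-- B groups the list into (parent, dash-children) runs instead of A's single stateful pass;
-- equivalence is about the RETURN value only (both Pythons also mutate `instructions` identically).

-- ===== PORT A =====
-- pvStepA is the loop body of A's for-loop, carrying
-- (processed, lastNonDashLabel, lastNonDashInstruction, instructionsToRemove)
def pvStepA (st : List (String × String) × Option String × Option String ×
                  PySem.Dict (Option String × Option String) Bool)
    (p : String × String) :
    List (String × String) × Option String × Option String ×
      PySem.Dict (Option String × Option String) Bool :=
  let processed := st.1
  let lastL := st.2.1
  let lastI := st.2.2.1
  let toRemove := st.2.2.2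
  let label := p.1
  let instruction := p.2
  if label = "-" then
    match lastI with
    | some li =>
      if li ≠ "" then
        (processed ++ [(label, li ++ ". " ++ instruction)], lastL, lastI,
          toRemove.insert (lastL, lastI) true)
      else (processed ++ [(label, instruction)], lastL, lastI, toRemove)
    | none => (processed ++ [(label, instruction)], lastL, lastI, toRemove)
  else (processed ++ [(label, instruction)], some label, some instruction, toRemove)

def processMarkdownList_py (instructions : List (String × String)) : List (String × String) :=
  let st := instructions.foldl pvStepA ([], none, none, PySem.Dict.empty)
  st.1
  -- the second Python loop only mutates the argument; the return value is `processed`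

-- ===== PORT B =====
-- span_dash: the leading dash-run of a list, plus the remainder
def pvSpanDash : List (String × String) → List (String × String) × List (String × String)
  | [] => ([], [])
  | (l, i) :: t =>
    if l = "-" then
      let s := pvSpanDash t
      ((l, i) :: s.1, s.2)
    else ([], (l, i) :: t)

theorem pvSpanDash_snd_le (xs : List (String × String)) : (pvSpanDash xs).2.length ≤ xs.length := by
  induction xs with
  | nil => simp [pvSpanDash]
  | cons h t ih =>
    obtain ⟨l, i⟩ := h
    simp only [pvSpanDash]
    split
    · exact Nat.le_succ_of_le ih
    · simp

def pvEmit (pi : String) (kids : List (String × String)) : List (String × String) :=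
  kids.map (fun p => (p.1, if pi = "" then p.2 else pi ++ ". " ++ p.2))

def pvRuns : List (String × String) → List (String × String)
  | [] => []
  | (l, i) :: t =>
    let s := pvSpanDash t
    (l, i) :: (pvEmit i s.1 ++ pvRuns s.2)
termination_by xs => xs.length
decreasing_by exact Nat.lt_succ_of_le (pvSpanDash_snd_le t)

def processMarkdownList_py_alt (instructions : List (String × String)) : List (String × String) :=
  let s := pvSpanDash instructions
  s.1 ++ pvRuns s.2

-- ===== PRECONDITION & SPEC =====
def Spec_processMarkdownList_py (instructions : List (String × String)) (out : List (String × String)) : Prop := out = processMarkdownList_py_alt instructions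
instance (instructions : List (String × String)) (out : List (String × String)) : Decidable (Spec_processMarkdownList_py instructions out) := by unfold Spec_processMarkdownList_py; infer_instance

-- ===== CLAIM (what is proved, stated in full; the proofs are below) =====
def Claim_equal_processMarkdownList_py : Prop := ∀ (instructions : List (String × String)), Dom_processMarkdownList_py instructions → Spec_processMarkdownList_py instructions (processMarkdownList_py instructions)

-- ===== LEMMAS AND PROOFS =====

-- A's output suffix from a given "last non-dash instruction" context (as a plain String,
-- "" standing for both None and the empty string — both fail Python truthiness).
def pvAGo (c : String) : List (String × String) → List (String × String)
  | [] => []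
  | (l, i) :: t =>
    if l = "-" then (l, if c = "" then i else c ++ ". " ++ i) :: pvAGo c t
    else (l, i) :: pvAGo i t

def pvCtx : Option String → String
  | none => ""
  | some s => s

-- A's foldl, state-abstracted: its processed component is processed ++ pvAGo (ctx lastI) rest
theorem pvFoldl_eq (rest : List (String × String)) :
    ∀ (processed : List (String × String)) (lastL lastI : Option String)
      (d : PySem.Dict (Option String × Option String) Bool),
    (rest.foldl pvStepA (processed, lastL, lastI, d)).1
      = processed ++ pvAGo (pvCtx lastI) rest := by
  induction rest with
  | nil => intro processed lastL lastI d; simp [pvAGo]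
  | cons p t ih =>
    intro processed lastL lastI d
    obtain ⟨l, i⟩ := p
    by_cases hl : l = "-"
    · cases lastI with
      | none =>
        rw [List.foldl_cons,
          show pvStepA (processed, lastL, none, d) (l, i)
              = (processed ++ [(l, i)], lastL, none, d) by simp [pvStepA, hl], ih]
        simp [pvAGo, hl, pvCtx]
      | some li =>
        by_cases hli : li = ""
        · rw [List.foldl_cons,
            show pvStepA (processed, lastL, some li, d) (l, i)
                = (processed ++ [(l, i)], lastL, some li, d) by simp [pvStepA, hl, hli], ih]
          simp [pvAGo, hl, pvCtx, hli]
        · rw [List.foldl_cons,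
            show pvStepA (processed, lastL, some li, d) (l, i)
                = (processed ++ [(l, li ++ ". " ++ i)], lastL, some li,
                    d.insert (lastL, some li) true) by simp [pvStepA, hl, hli], ih]
          simp [pvAGo, hl, pvCtx, hli]
    · rw [List.foldl_cons,
        show pvStepA (processed, lastL, lastI, d) (l, i)
            = (processed ++ [(l, i)], some l, some i, d) by simp [pvStepA, hl], ih]
      simp [pvAGo, hl, pvCtx]

-- dash-run items do not change the context: pvAGo over kids ++ rest splits into emitted kids
theorem pvAGo_dash_append (c : String) (kids rest : List (String × String))
    (h : ∀ p ∈ kids, p.1 = "-") :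
    pvAGo c (kids ++ rest) = pvEmit c kids ++ pvAGo c rest := by
  induction kids with
  | nil => simp [pvEmit]
  | cons k t ih =>
    obtain ⟨l, i⟩ := k
    have hl : l = "-" := h (l, i) (List.mem_cons_self ..)
    simp only [List.cons_append, pvAGo, hl, pvEmit, List.map_cons]
    simp only [pvEmit] at ih
    simp [ih fun p hp => h p (List.mem_cons_of_mem _ hp)]

theorem pvSpanDash_spec (xs : List (String × String)) :
    (∀ p ∈ (pvSpanDash xs).1, p.1 = "-") ∧
    (pvSpanDash xs).1 ++ (pvSpanDash xs).2 = xs ∧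
    (∀ q ∈ (pvSpanDash xs).2.head?, q.1 ≠ "-") := by
  induction xs with
  | nil => simp [pvSpanDash]
  | cons h t ih =>
    obtain ⟨l, i⟩ := h
    by_cases hl : l = "-"
    · simp only [pvSpanDash, if_pos hl]
      refine ⟨?_, by simp [ih.2.1], ih.2.2⟩
      intro p hp
      rcases List.mem_cons.mp hp with h1 | h2
      · simp [h1, hl]
      · exact ih.1 p h2
    · simp [pvSpanDash, hl]

-- on a list whose head is not a dash item, pvAGo agrees with B's run recursion
theorem pvAGo_eq_runs (n : ℕ) : ∀ (xs : List (String × String)), xs.length ≤ n →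
    (∀ q ∈ xs.head?, q.1 ≠ "-") → ∀ c, pvAGo c xs = pvRuns xs := by
  induction n with
  | zero =>
    intro xs hn _ c
    interval_cases h : xs.length
    · simp [List.length_eq_zero_iff.mp h, pvAGo, pvRuns]
  | succ n ih =>
    intro xs hn hhead c
    cases xs with
    | nil => simp [pvAGo, pvRuns]
    | cons p t =>
      obtain ⟨l, i⟩ := p
      have hl : l ≠ "-" := by simpa using hhead (l, i) (by simp)
      obtain ⟨hdash, hsplit, hhd⟩ := pvSpanDash_spec t
      have ht : pvAGo i t = pvEmit i (pvSpanDash t).1 ++ pvAGo i (pvSpanDash t).2 := by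
        conv_lhs => rw [← hsplit]
        exact pvAGo_dash_append i _ _ hdash
      have hlen : (pvSpanDash t).2.length ≤ n := by
        have := pvSpanDash_snd_le t
        simp only [List.length_cons] at hn
        omega
      rw [pvRuns]
      simp only [pvAGo, if_neg hl, ht, ih _ hlen hhd i]

-- ===== VERDICT (by name: the statement is the Claim_ definition above) =====
theorem processMarkdownList_py_spec : Claim_equal_processMarkdownList_py := by
  intro instructions _
  unfold Spec_processMarkdownList_py processMarkdownList_py processMarkdownList_py_alt
  obtain ⟨hdash, hsplit, hhd⟩ := pvSpanDash_spec instructions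
  rw [pvFoldl_eq]
  have h1 : pvAGo (pvCtx none) instructions
      = pvEmit "" (pvSpanDash instructions).1 ++ pvAGo "" (pvSpanDash instructions).2 := by
    conv_lhs => rw [← hsplit]
    exact pvAGo_dash_append _ _ _ hdash
  have h2 : pvEmit "" (pvSpanDash instructions).1 = (pvSpanDash instructions).1 := by
    simp [pvEmit]
  rw [h1, h2, pvAGo_eq_runs (pvSpanDash instructions).2.length _ le_rfl hhd]
  simp
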